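-- pv_equiv track=rewrite | github.com/timnirmal/lseg_projects | set analysis/set.py | remove_redundant_subsequences
-- ===== SOURCE A (Python) =====
-- def remove_redundant_subsequences(subsequences):
--     subsequences_to_remove = set()
--
--     # Iterate through each subsequence
--     for subseq, count in subsequences.items():
--         # Check for all possible shorter subsequences
--         for i in range(1, len(subseq)):
--             for j in range(len(subseq) - i + 1):
--                 shorter_subseq = subseq[j:j + i]
--                 # If the shorter subsequence exists with a lower or equal count, mark it for removal
--                 if shorter_subseq in subsequences and subsequences[shorter_subseq] <= count:
--                     subsequences_to_remove.add(shorter_subseq)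
--
--     # Remove the marked subsequences
--     for subseq in subsequences_to_remove:
--         subsequences.pop(subseq)
--
--     return subsequences
-- ===== SOURCE B (Python) =====
-- def remove_redundant_subsequences(subsequences):
--     items = list(subsequences.items())
--     to_remove = set()
--     for s2, c2 in items:
--         for s1, c1 in items:
--             if 0 < len(s1) < len(s2) and s1 in s2 and c1 <= c2:
--                 to_remove.add(s1)
--     for s in to_remove:
--         subsequences.pop(s)
--     return subsequences
-- ===== Notes on version B (the rewrite author's own statement) =====
-- stated objective: simpler
-- what changed: Instead of enumerating every proper substring of every key (O(L^2) slices per key) and looking each up in the dict, B compares keys pairwise and marks s1 for removal when it is a shorter non-empty built-in substring of s2 with count <= s2's count.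
import Mathlib
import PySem

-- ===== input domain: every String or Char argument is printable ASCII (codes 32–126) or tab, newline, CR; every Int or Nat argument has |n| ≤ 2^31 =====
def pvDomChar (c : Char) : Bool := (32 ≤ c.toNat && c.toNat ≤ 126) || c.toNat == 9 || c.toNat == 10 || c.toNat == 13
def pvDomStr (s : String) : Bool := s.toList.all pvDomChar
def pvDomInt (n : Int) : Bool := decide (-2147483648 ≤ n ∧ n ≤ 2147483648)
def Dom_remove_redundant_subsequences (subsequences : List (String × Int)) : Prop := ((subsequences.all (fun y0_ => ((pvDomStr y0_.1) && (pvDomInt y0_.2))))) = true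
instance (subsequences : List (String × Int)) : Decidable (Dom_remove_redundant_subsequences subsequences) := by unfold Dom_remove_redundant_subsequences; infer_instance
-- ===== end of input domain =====

-- B replaces A's enumeration of every proper substring of every key by a pairwise scan of the
-- keys with Python's built-in substring test ('simpler'); equivalence is about the RETURN value
-- (both Pythons mutate the argument dict in place in the same way).

-- ===== PORT A =====
def remove_redundant_subsequences (subsequences : List (String × Int)) : List (String × Int) :=
  let d : PySem.Dict String Int := PySem.Dict.mk subsequences
  let toRemove : PySem.Set String :=
    d.items.foldl (fun S p =>
      (PySem.List.pyRange 1 (PySem.Str.len p.1) 1).foldl (fun S i =>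
        (PySem.List.pyRange 0 (PySem.Str.len p.1 - i + 1) 1).foldl (fun S j =>
          let shorter := PySem.Str.slice p.1 (some j) (some (j + i))
          match d.get? shorter with
          | some v => if v ≤ p.2 then PySem.Set.add S shorter else S
          | none => S) S) S) PySem.Set.empty
  (toRemove.foldl (fun d k => d.erase k) d).items

-- ===== PORT B =====
def remove_redundant_subsequences_alt (subsequences : List (String × Int)) : List (String × Int) :=
  let d : PySem.Dict String Int := PySem.Dict.mk subsequences
  let items := d.items
  let toRemove : PySem.Set String :=
    items.foldl (fun S p2 =>
      items.foldl (fun S p1 =>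
        if 0 < PySem.Str.len p1.1 ∧ PySem.Str.len p1.1 < PySem.Str.len p2.1 ∧
            PySem.Str.isIn p1.1 p2.1 = true ∧ p1.2 ≤ p2.2
        then PySem.Set.add S p1.1 else S) S) PySem.Set.empty
  (toRemove.foldl (fun d k => d.erase k) d).items

-- ===== PRECONDITION & SPEC =====
-- Pre_ excludes association lists with duplicate keys: they do not represent a Python dict
-- (dict keys are unique), so A's behaviour on them is not defined by the source.
def Pre_remove_redundant_subsequences (subsequences : List (String × Int)) : Prop :=
  (subsequences.map Prod.fst).Nodup
instance (subsequences : List (String × Int)) : Decidable (Pre_remove_redundant_subsequences subsequences) := by unfold Pre_remove_redundant_subsequences; infer_instance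

def pvWitness_remove_redundant_subsequences : (List (String × Int)) :=
  [("abc", 2), ("ab", 1), ("x", 5)]

def Spec_remove_redundant_subsequences (subsequences : List (String × Int)) (out : List (String × Int)) : Prop := out = remove_redundant_subsequences_alt subsequences
instance (subsequences : List (String × Int)) (out : List (String × Int)) : Decidable (Spec_remove_redundant_subsequences subsequences out) := by unfold Spec_remove_redundant_subsequences; infer_instance

-- ===== CLAIM (what is proved, stated in full; the proofs are below) =====
def Claim_equal_remove_redundant_subsequences : Prop := ∀ (subsequences : List (String × Int)), Dom_remove_redundant_subsequences subsequences → Pre_remove_redundant_subsequences subsequences → Spec_remove_redundant_subsequences subsequences (remove_redundant_subsequences subsequences)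

-- ===== LEMMAS AND PROOFS =====

-- membership in a conditional-add fold
theorem pv_mem_foldl {α : Type} (g : PySem.Set String → α → PySem.Set String)
    (Q : α → String → Prop)
    (hg : ∀ S a x, x ∈ g S a ↔ x ∈ S ∨ Q a x) :
    ∀ (l : List α) (S : PySem.Set String) (x : String),
      x ∈ l.foldl g S ↔ x ∈ S ∨ ∃ a ∈ l, Q a x := by
  intro l
  induction l with
  | nil => simp
  | cons a t ih =>
    intro S x
    simp only [List.foldl_cons, ih, hg, List.mem_cons]
    constructor
    · rintro ((h | h) | ⟨b, hb, hq⟩)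
      · exact Or.inl h
      · exact Or.inr ⟨a, Or.inl rfl, h⟩
      · exact Or.inr ⟨b, Or.inr hb, hq⟩
    · rintro (h | ⟨b, (rfl | hb), hq⟩)
      · exact Or.inl (Or.inl h)
      · exact Or.inl (Or.inr hq)
      · exact Or.inr ⟨b, hb, hq⟩

-- erase-fold is a filter on the keys
theorem pv_foldl_erase (S : List String) :
    ∀ (d : PySem.Dict String Int),
      (S.foldl (fun d k => d.erase k) d).items
        = d.items.filter (fun p => !decide (p.1 ∈ S)) := by
  induction S with
  | nil => intro d; simp
  | cons k t ih =>
    intro d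
    rw [List.foldl_cons, ih]
    have he : (d.erase k).items = d.items.filter (fun p => !(p.1 == k)) := rfl
    rw [he, List.filter_filter]
    apply List.filter_congr
    intro p _
    by_cases h1 : p.1 = k <;> by_cases h2 : p.1 ∈ t <;> simp [h1, h2]

-- the substring bridge: A's slice enumeration reaches x iff x is a shorter non-empty substring
theorem pv_bridge (s2 x : String) :
    (∃ i : ℤ, (1 ≤ i ∧ i < PySem.Str.len s2) ∧
      ∃ j : ℤ, (0 ≤ j ∧ j < PySem.Str.len s2 - i + 1) ∧
        x = PySem.Str.slice s2 (some j) (some (j + i)))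
    ↔ (0 < PySem.Str.len x ∧ PySem.Str.len x < PySem.Str.len s2 ∧
        PySem.Str.isIn x s2 = true) := by
  constructor
  · rintro ⟨i, ⟨hi1, hi2⟩, j, ⟨hj0, hj1⟩, hx⟩
    obtain ⟨a, rfl⟩ : ∃ a : ℕ, i = (a : ℤ) := ⟨i.toNat, (Int.toNat_of_nonneg (by omega)).symm⟩
    obtain ⟨b, rfl⟩ : ∃ b : ℕ, j = (b : ℤ) := ⟨j.toNat, (Int.toNat_of_nonneg hj0).symm⟩
    have hlt : x.toList = (s2.toList.drop b).take a := by
      rw [hx, PySem.Str.toList_slice, PySem.Chars.slice_eq_listSlice,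
        PySem.List.slice_natCast_add]
    have hlen2 : PySem.Str.len s2 = (s2.toList.length : ℤ) := PySem.Str.len_eq s2
    have hba : b + a ≤ s2.toList.length := by omega
    have hlenx : x.toList.length = a := by
      rw [hlt, List.length_take, List.length_drop]; omega
    have hinf : x.toList <:+: s2.toList := by
      rw [hlt]
      exact ((List.take_prefix a (s2.toList.drop b)).isInfix).trans
        ((List.drop_suffix b s2.toList).isInfix)
    refine ⟨?_, ?_, (PySem.Str.isIn_iff_infix x s2).2 hinf⟩
    · rw [PySem.Str.len_eq, hlenx]; omega
    · rw [PySem.Str.len_eq, hlenx]; omega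
  · rintro ⟨h0, hlt, hin⟩
    obtain ⟨t, u, hdec⟩ := (PySem.Str.isIn_iff_infix x s2).1 hin
    have hlen2 : PySem.Str.len s2 = (s2.toList.length : ℤ) := PySem.Str.len_eq s2
    have hlenx : PySem.Str.len x = (x.toList.length : ℤ) := PySem.Str.len_eq x
    refine ⟨(x.toList.length : ℤ), ⟨by omega, by omega⟩, (t.length : ℤ), ⟨by omega, ?_⟩, ?_⟩
    · have hl := congrArg List.length hdec
      simp only [List.length_append] at hl
      omega
    · refine (String.toList_inj).1 ?_
      have hslice : (PySem.Str.slice s2 (some (t.length : ℤ))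
          (some ((t.length : ℤ) + (x.toList.length : ℤ)))).toList
          = (s2.toList.drop t.length).take x.toList.length := by
        rw [PySem.Str.toList_slice, PySem.Chars.slice_eq_listSlice,
          PySem.List.slice_natCast_add]
      have hdrop : s2.toList.drop t.length = x.toList ++ u := by
        rw [← hdec, List.append_assoc, List.drop_left]
      rw [hslice, hdrop, List.take_left]

-- the two removal sets have the same members (keys are unique)
theorem pv_sets_eq (l : List (String × Int)) (hnd : (l.map Prod.fst).Nodup) (x : String) :
    (x ∈ (PySem.Dict.mk l).items.foldl (fun S p =>
      (PySem.List.pyRange 1 (PySem.Str.len p.1) 1).foldl (fun S i =>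
        (PySem.List.pyRange 0 (PySem.Str.len p.1 - i + 1) 1).foldl (fun S j =>
          let shorter := PySem.Str.slice p.1 (some j) (some (j + i))
          match (PySem.Dict.mk l).get? shorter with
          | some v => if v ≤ p.2 then PySem.Set.add S shorter else S
          | none => S) S) S) PySem.Set.empty)
    ↔ (x ∈ (PySem.Dict.mk l).items.foldl (fun S p2 =>
      (PySem.Dict.mk l).items.foldl (fun S p1 =>
        if 0 < PySem.Str.len p1.1 ∧ PySem.Str.len p1.1 < PySem.Str.len p2.1 ∧
            PySem.Str.isIn p1.1 p2.1 = true ∧ p1.2 ≤ p2.2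
        then PySem.Set.add S p1.1 else S) S) PySem.Set.empty) :=
  by
  have hkeys : (PySem.Dict.mk l).keys.Nodup := hnd
  -- innermost step of A
  have hstep0 : ∀ (p : String × Int) (i : ℤ) (S : PySem.Set String) (j : ℤ) (x : String),
      (x ∈ (fun (S : PySem.Set String) (j : ℤ) =>
          let shorter := PySem.Str.slice p.1 (some j) (some (j + i))
          match (PySem.Dict.mk l).get? shorter with
          | some v => if v ≤ p.2 then PySem.Set.add S shorter else S
          | none => S) S j)
        ↔ x ∈ S ∨ (x = PySem.Str.slice p.1 (some j) (some (j + i)) ∧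
            ∃ v, (PySem.Dict.mk l).get? x = some v ∧ v ≤ p.2) := by
    intro p i S j x
    dsimp only
    cases hg : (PySem.Dict.mk l).get? (PySem.Str.slice p.1 (some j) (some (j + i))) with
    | none =>
      constructor
      · exact Or.inl
      · rintro (h | ⟨rfl, v, hv, _⟩)
        · exact h
        · rw [hg] at hv; cases hv
    | some v =>
      dsimp only
      by_cases hvle : v ≤ p.2
      · rw [if_pos hvle, PySem.Set.mem_add]
        constructor
        · rintro (h | rfl)
          · exact Or.inl h
          · exact Or.inr ⟨rfl, v, hg, hvle⟩
        · rintro (h | ⟨rfl, _⟩)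
          · exact Or.inl h
          · exact Or.inr rfl
      · rw [if_neg hvle]
        constructor
        · exact Or.inl
        · rintro (h | ⟨rfl, w, hw, hwle⟩)
          · exact h
          · rw [hg] at hw; cases hw; exact absurd hwle hvle
  -- characterize membership in A's removal set
  rw [pv_mem_foldl _ (fun p x =>
      ∃ i ∈ PySem.List.pyRange 1 (PySem.Str.len p.1) 1,
        ∃ j ∈ PySem.List.pyRange 0 (PySem.Str.len p.1 - i + 1) 1,
          x = PySem.Str.slice p.1 (some j) (some (j + i)) ∧
            ∃ v, (PySem.Dict.mk l).get? x = some v ∧ v ≤ p.2)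
    (by
      intro S p x
      exact pv_mem_foldl _ (fun i x =>
          ∃ j ∈ PySem.List.pyRange 0 (PySem.Str.len p.1 - i + 1) 1,
            x = PySem.Str.slice p.1 (some j) (some (j + i)) ∧
              ∃ v, (PySem.Dict.mk l).get? x = some v ∧ v ≤ p.2)
        (by
          intro S i x
          exact pv_mem_foldl _ (fun j x =>
              x = PySem.Str.slice p.1 (some j) (some (j + i)) ∧
                ∃ v, (PySem.Dict.mk l).get? x = some v ∧ v ≤ p.2)
            (hstep0 p i) _ S x) _ S x)]
  -- characterize membership in B's removal set
  rw [pv_mem_foldl _ (fun p2 x =>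
      ∃ p1 ∈ (PySem.Dict.mk l).items,
        (0 < PySem.Str.len p1.1 ∧ PySem.Str.len p1.1 < PySem.Str.len p2.1 ∧
          PySem.Str.isIn p1.1 p2.1 = true ∧ p1.2 ≤ p2.2) ∧ x = p1.1)
    (by
      intro S p2 x
      refine pv_mem_foldl _ (fun (p1 : String × Int) (x : String) =>
          (0 < PySem.Str.len p1.1 ∧ PySem.Str.len p1.1 < PySem.Str.len p2.1 ∧
            PySem.Str.isIn p1.1 p2.1 = true ∧ p1.2 ≤ p2.2) ∧ x = p1.1) ?_ _ S x
      intro S p1 x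
      by_cases hc : 0 < PySem.Str.len p1.1 ∧ PySem.Str.len p1.1 < PySem.Str.len p2.1 ∧
          PySem.Str.isIn p1.1 p2.1 = true ∧ p1.2 ≤ p2.2
      · rw [if_pos hc, PySem.Set.mem_add]
        constructor
        · rintro (h | rfl)
          · exact Or.inl h
          · exact Or.inr ⟨hc, rfl⟩
        · rintro (h | ⟨_, rfl⟩)
          · exact Or.inl h
          · exact Or.inr rfl
      · rw [if_neg hc]
        constructor
        · exact Or.inl
        · rintro (h | ⟨hcc, rfl⟩)
          · exact h
          · exact absurd hcc hc)]
  have hempty : ∀ y : String, y ∈ (PySem.Set.empty : PySem.Set String) ↔ False := by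
    intro y; simp [PySem.Set.empty]
  simp only [hempty, false_or]
  constructor
  · rintro ⟨p, hp, i, hi, j, hj, hxeq, v, hv, hvle⟩
    rw [PySem.List.mem_pyRange_one] at hi hj
    have hbr := (pv_bridge p.1 x).1 ⟨i, hi, j, hj, hxeq⟩
    have hx1 : (x, v) ∈ (PySem.Dict.mk l).items :=
      (PySem.Dict.get?_eq_some_iff_mem_items _ _ _ hkeys).1 hv
    exact ⟨p, hp, (x, v), hx1, ⟨hbr.1, hbr.2.1, hbr.2.2, hvle⟩, rfl⟩
  · rintro ⟨p2, hp2, p1, hp1, ⟨h0, hlt, hin, hle⟩, rfl⟩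
    obtain ⟨i, hi, j, hj, hxeq⟩ := (pv_bridge p2.1 p1.1).2 ⟨h0, hlt, hin⟩
    have hv : (PySem.Dict.mk l).get? p1.1 = some p1.2 :=
      (PySem.Dict.get?_eq_some_iff_mem_items _ _ _ hkeys).2 hp1
    exact ⟨p2, hp2, i, PySem.List.mem_pyRange_one.2 hi, j, PySem.List.mem_pyRange_one.2 hj,
      hxeq, p1.2, hv, hle⟩

-- ===== VERDICT (by name: the statement is the Claim_ definition above) =====
theorem remove_redundant_subsequences_spec : Claim_equal_remove_redundant_subsequences := by
  intro l _ hpre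
  unfold Spec_remove_redundant_subsequences remove_redundant_subsequences remove_redundant_subsequences_alt
  dsimp only
  rw [pv_foldl_erase, pv_foldl_erase]
  apply List.filter_congr
  intro p _
  congr 1
  exact decide_eq_decide.mpr (pv_sets_eq l hpre p.1)
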